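-- pv_equiv track=rewrite | github.com/junghan0611/memex-kb | proposal-pipeline/merge_chapters.py | strip_org_header
-- ===== SOURCE A (Python) =====
-- def strip_org_header(content: str) -> str:
--     """Org 파일에서 #+TITLE, #+DATE, #+STARTUP 헤더 제거"""
--     lines = content.split('\n')
--     result = []
--     for line in lines:
--         if line.startswith('#+TITLE:'):
--             continue
--         if line.startswith('#+DATE:'):
--             continue
--         if line.startswith('#+STARTUP:'):
--             continue
--         result.append(line)
--     # 앞쪽 빈 줄 제거
--     while result and not result[0].strip():
--         result.pop(0)
--     return '\n'.join(result)
-- ===== SOURCE B (Python) =====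
-- def strip_org_header(content: str) -> str:
--     out = []
--     started = False
--     for line in content.split('\n'):
--         if line.startswith(('#+TITLE:', '#+DATE:', '#+STARTUP:')):
--             continue
--         if not started and not line.strip():
--             continue
--         started = True
--         out.append(line)
--     return '\n'.join(out)
-- ===== Notes on version B (the rewrite author's own statement) =====
-- stated objective: simpler
-- what changed: Replaces the filter pass plus the while-pop trimming loop with a single stateful scan using a boolean seen-content flag that drops header lines and leading blanks in one pass.
import Mathlib
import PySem

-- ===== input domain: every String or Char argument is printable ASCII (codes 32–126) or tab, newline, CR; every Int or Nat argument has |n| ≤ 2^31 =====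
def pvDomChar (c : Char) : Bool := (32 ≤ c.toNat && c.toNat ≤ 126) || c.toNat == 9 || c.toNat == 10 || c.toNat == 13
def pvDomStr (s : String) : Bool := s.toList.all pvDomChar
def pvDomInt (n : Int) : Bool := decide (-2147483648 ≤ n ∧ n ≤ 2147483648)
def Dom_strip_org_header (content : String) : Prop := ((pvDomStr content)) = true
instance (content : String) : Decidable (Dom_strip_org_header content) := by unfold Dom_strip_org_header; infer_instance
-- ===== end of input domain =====

-- B replaces A's filter pass plus while-pop trimming with one stateful scan with a seen-content flag; same return value, no speed claim.

-- ===== PORT A =====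
-- the 'while result and not result[0].strip(): result.pop(0)' loop
def stripAWhile (result : List String) : List String :=
  match result with
  | [] => []
  | l :: rest => if PySem.Str.strip l = "" then stripAWhile rest else l :: rest

def strip_org_header (content : String) : String :=
  let lines := (PySem.Str.split? content "\n").getD []
  let result := lines.foldl (fun acc line =>
    if PySem.Str.startswith line "#+TITLE:" then acc
    else if PySem.Str.startswith line "#+DATE:" then acc
    else if PySem.Str.startswith line "#+STARTUP:" then acc
    else acc ++ [line]) []
  PySem.Str.join "\n" (stripAWhile result)

-- ===== PORT B =====
def isOrgHeader (line : String) : Bool :=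
  PySem.Str.startswith line "#+TITLE:" || PySem.Str.startswith line "#+DATE:" ||
  PySem.Str.startswith line "#+STARTUP:"

def altLoop (started : Bool) (out : List String) (lines : List String) : List String :=
  match lines with
  | [] => out
  | l :: rest =>
    if isOrgHeader l then altLoop started out rest
    else if !started && PySem.Str.strip l = "" then altLoop started out rest
    else altLoop true (out ++ [l]) rest

def strip_org_header_alt (content : String) : String :=
  PySem.Str.join "\n" (altLoop false [] ((PySem.Str.split? content "\n").getD []))

-- ===== PRECONDITION & SPEC =====
def Spec_strip_org_header (content : String) (out : String) : Prop := out = strip_org_header_alt content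
instance (content : String) (out : String) : Decidable (Spec_strip_org_header content out) := by unfold Spec_strip_org_header; infer_instance

-- ===== CLAIM (what is proved, stated in full; the proofs are below) =====
def Claim_equal_strip_org_header : Prop := ∀ (content : String), Dom_strip_org_header content → Spec_strip_org_header content (strip_org_header content)

-- ===== LEMMAS AND PROOFS =====

lemma foldl_filter (ls : List String) (acc : List String) :
    ls.foldl (fun acc line =>
      if PySem.Str.startswith line "#+TITLE:" then acc
      else if PySem.Str.startswith line "#+DATE:" then acc
      else if PySem.Str.startswith line "#+STARTUP:" then acc
      else acc ++ [line]) acc = acc ++ ls.filter (fun l => !isOrgHeader l) := by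
  induction ls generalizing acc with
  | nil => simp
  | cons l rest ih =>
    simp only [List.foldl, List.filter_cons]
    split_ifs with h1 h2 h3 <;> simp_all [isOrgHeader]

lemma altLoop_true (ls : List String) (out : List String) :
    altLoop true out ls = out ++ ls.filter (fun l => !isOrgHeader l) := by
  induction ls generalizing out with
  | nil => simp [altLoop]
  | cons l rest ih =>
    by_cases h : isOrgHeader l = true <;> simp [altLoop, h, ih]

lemma altLoop_false (ls : List String) :
    altLoop false [] ls = stripAWhile (ls.filter (fun l => !isOrgHeader l)) := by
  induction ls with
  | nil => simp [altLoop, stripAWhile]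
  | cons l rest ih =>
    by_cases h : isOrgHeader l = true
    · simp [altLoop, h, ih]
    · by_cases hb : PySem.Str.strip l = ""
      · simp [altLoop, h, hb, ih, stripAWhile]
      · simp [altLoop, h, hb, stripAWhile, altLoop_true]

-- ===== VERDICT (by name: the statement is the Claim_ definition above) =====
theorem strip_org_header_spec : Claim_equal_strip_org_header := by
  intro content _
  unfold Spec_strip_org_header strip_org_header strip_org_header_alt
  simp only [altLoop_false, foldl_filter, List.nil_append]
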